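-- pv_equiv track=rewrite | github.com/Awesome20225266/Operation-Intelligence | raw_analyser.py | _sanitize_table_guess
-- ===== SOURCE A (Python) =====
-- def _sanitize_table_guess(site_name: str) -> str:
--     # Requirement: table == selected_site_name.lower(), but we keep a safe sanitizer
--     # for cases like "GSPL-GAP" -> "gspl_gap" while still being deterministic.
--     s = str(site_name).strip().lower()
--     out: list[str] = []
--     prev_us = False
--     for ch in s:
--         if ch.isalnum():
--             out.append(ch)
--             prev_us = False
--         else:
--             if not prev_us:
--                 out.append("_")
--                 prev_us = True
--     return "".join(out).strip("_") or s
-- ===== SOURCE B (Python) =====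
-- from itertools import groupby
--
-- def _sanitize_table_guess(site_name: str) -> str:
--     s = str(site_name).strip().lower()
--     tokens = ["".join(g) for is_alnum, g in groupby(s, key=str.isalnum) if is_alnum]
--     return "_".join(tokens) or s
-- ===== Notes on version B (the rewrite author's own statement) =====
-- stated objective: simpler
-- what changed: Replaced the explicit prev_us state machine with trailing underscore-stripping by grouping the string into maximal alphanumeric runs (itertools.groupby) and joining them with underscores, which yields single, non-boundary separators by construction.
import Mathlib
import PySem

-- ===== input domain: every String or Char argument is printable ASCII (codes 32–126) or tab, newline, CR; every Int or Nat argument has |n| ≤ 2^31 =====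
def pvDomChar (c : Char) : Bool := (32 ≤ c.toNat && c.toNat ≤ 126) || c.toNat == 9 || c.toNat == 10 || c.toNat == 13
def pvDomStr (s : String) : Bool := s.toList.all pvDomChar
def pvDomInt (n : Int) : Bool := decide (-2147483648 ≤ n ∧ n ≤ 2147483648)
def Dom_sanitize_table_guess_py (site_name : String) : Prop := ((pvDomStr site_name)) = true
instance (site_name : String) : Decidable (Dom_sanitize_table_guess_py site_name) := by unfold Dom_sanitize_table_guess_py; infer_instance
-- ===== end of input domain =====

-- B replaces A's prev_us state machine + trailing strip('_') with groupby-style maximal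
-- alphanumeric runs joined by '_' (objective: simpler).

-- ===== PORT A =====
-- s = str(site_name).strip().lower(); loop with out/prev_us; "".join(out).strip("_") or s
-- the loop body: if ch.isalnum: append ch, prev_us=False; elif not prev_us: append '_', prev_us=True
def pvStepA (st : List Char × Bool) (ch : Char) : List Char × Bool :=
  if PySem.Chars.isalnum ch then (st.1 ++ [ch], false)
  else if !st.2 then (st.1 ++ ['_'], true) else st

def sanitize_table_guess_py (site_name : String) : String :=
  let s : List Char := PySem.Chars.lower (PySem.Chars.strip site_name.toList)
  let st : List Char × Bool := s.foldl pvStepA ([], false)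
  let r : List Char := PySem.Chars.stripChars st.1 ['_']
  if r = [] then String.ofList s else String.ofList r

-- ===== PORT B =====
-- maximal alphanumeric runs of s (itertools.groupby(s, key=str.isalnum), keeping the True groups)
def pvAlnumRuns : List Char → List (List Char)
  | [] => []
  | c :: cs =>
    if PySem.Chars.isalnum c then
      (c :: cs.takeWhile PySem.Chars.isalnum) :: pvAlnumRuns (cs.dropWhile PySem.Chars.isalnum)
    else pvAlnumRuns cs
termination_by cs => cs.length
decreasing_by
· have := List.length_dropWhile_le (p := PySem.Chars.isalnum) (l := cs); simp; omega
· simp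

-- s = str(site_name).strip().lower(); '_'.join(tokens) or s
def sanitize_table_guess_py_alt (site_name : String) : String :=
  let s : List Char := PySem.Chars.lower (PySem.Chars.strip site_name.toList)
  let r : List Char := PySem.Chars.join ['_'] (pvAlnumRuns s)
  if r = [] then String.ofList s else String.ofList r

-- ===== PRECONDITION & SPEC =====
def Spec_sanitize_table_guess_py (site_name : String) (out : String) : Prop := out = sanitize_table_guess_py_alt site_name
instance (site_name : String) (out : String) : Decidable (Spec_sanitize_table_guess_py site_name out) := by unfold Spec_sanitize_table_guess_py; infer_instance

-- ===== CLAIM (what is proved, stated in full; the proofs are below) =====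
def Claim_equal_sanitize_table_guess_py : Prop := ∀ (site_name : String), Dom_sanitize_table_guess_py site_name → Spec_sanitize_table_guess_py site_name (sanitize_table_guess_py site_name)

-- ===== LEMMAS AND PROOFS =====

-- A's emitted char list, as a structural recursion over the chars with the prev_us flag
def pvFA : List Char → Bool → List Char
  | [], _ => []
  | c :: cs, p =>
    if PySem.Chars.isalnum c then c :: pvFA cs false
    else if p then pvFA cs true else '_' :: pvFA cs true

-- '_'-membership test and the '_'-rstrip used by stripChars
def pvU (c : Char) : Bool := (['_'] : List Char).contains c
def pvRstripU (x : List Char) : List Char := (x.reverse.dropWhile pvU).reverse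

lemma pvFA_foldl (cs : List Char) : ∀ (acc : List Char) (p : Bool),
    (cs.foldl pvStepA (acc, p)).1 = acc ++ pvFA cs p := by
  induction cs with
  | nil => intro acc p; simp [pvFA]
  | cons c cs ih =>
    intro acc p
    by_cases h : PySem.Chars.isalnum c
    · simp [pvStepA, pvFA, h, ih]
    · cases p <;> simp [pvStepA, pvFA, h, ih]

lemma pvDropWhile_append_singleton {p : Char → Bool} {c : Char} (h : p c = false)
    (l : List Char) : (l ++ [c]).dropWhile p = l.dropWhile p ++ [c] := by
  induction l with
  | nil => simp [List.dropWhile, h]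
  | cons d l ih =>
    by_cases hd : p d <;> simp [List.dropWhile, hd, ih]

lemma pvRstripU_cons {c : Char} (h : pvU c = false) (x : List Char) :
    pvRstripU (c :: x) = c :: pvRstripU x := by
  simp [pvRstripU, pvDropWhile_append_singleton h]

lemma pvU_alnum {c : Char} (h : PySem.Chars.isalnum c = true) : pvU c = false := by
  simp only [pvU, List.contains_cons, List.contains_nil, Bool.or_false]
  by_contra hc
  simp only [Bool.not_eq_false, beq_iff_eq] at hc
  subst hc
  exact absurd h (by decide)

-- fA with p = true emits nothing until an alphanumeric char: its head is alphanumeric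
lemma pvFA_true_head (cs : List Char) :
    pvFA cs true = [] ∨ ∃ d x, pvFA cs true = d :: x ∧ PySem.Chars.isalnum d = true := by
  induction cs with
  | nil => left; rfl
  | cons c cs ih =>
    by_cases h : PySem.Chars.isalnum c
    · right; exact ⟨c, pvFA cs false, by simp [pvFA, h], h⟩
    · simpa [pvFA, h] using ih

-- the '_'-joined runs
def pvG (cs : List Char) : List Char := PySem.Chars.join ['_'] (pvAlnumRuns cs)

lemma pvG_cons_alnum {c : Char} (h : PySem.Chars.isalnum c = true) (cs : List Char) :
    pvG (c :: cs) =
      c :: (cs.takeWhile PySem.Chars.isalnum ++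
        (if pvAlnumRuns (cs.dropWhile PySem.Chars.isalnum) = [] then []
         else '_' :: pvG (cs.dropWhile PySem.Chars.isalnum))) := by
  rw [pvG, pvAlnumRuns]
  simp only [h, if_true]
  cases hr : pvAlnumRuns (cs.dropWhile PySem.Chars.isalnum) with
  | nil => simp [PySem.Chars.join, List.intercalate]
  | cons a as => simp [PySem.Chars.join, pvG, hr, List.intercalate]

lemma pvG_cons_not_alnum {c : Char} (h : PySem.Chars.isalnum c = false) (cs : List Char) :
    pvG (c :: cs) = pvG cs := by
  rw [pvG, pvAlnumRuns]; simp [h, pvG]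

-- general cons law for the '_'-rstrip
lemma pvRstripU_cons' (c : Char) (x : List Char) :
    pvRstripU (c :: x) =
      if pvRstripU x = [] then (if pvU c then [] else [c]) else c :: pvRstripU x := by
  simp only [pvRstripU, List.reverse_cons, List.dropWhile_append]
  by_cases he : (x.reverse.dropWhile pvU) = []
  · by_cases hc : pvU c <;> simp [he, List.dropWhile, hc]
  · simp [he, List.isEmpty_iff]

-- the joined runs are empty exactly when there is no alphanumeric run
lemma pvG_eq_nil_iff (cs : List Char) : pvG cs = [] ↔ pvAlnumRuns cs = [] := by
  induction cs with
  | nil => simp [pvG, pvAlnumRuns, PySem.Chars.join, List.intercalate]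
  | cons c cs ih =>
    by_cases h : PySem.Chars.isalnum c
    · rw [pvG_cons_alnum h, pvAlnumRuns]; simp [h]
    · rw [pvG_cons_not_alnum (by simpa using h), pvAlnumRuns]; simp [h, ih]

-- the main invariant: rstrip-by-'_' of A's emission equals the joined runs
lemma pvTF (cs : List Char) :
    pvRstripU (pvFA cs true) = pvG cs ∧
    pvRstripU (pvFA cs false) =
      (if pvAlnumRuns cs = [] then []
       else (match cs with
             | c :: _ => if PySem.Chars.isalnum c then [] else ['_']
             | [] => []) ++ pvG cs) := by
  induction cs with
  | nil => constructor <;> simp [pvFA, pvRstripU, pvG, pvAlnumRuns, PySem.Chars.join, List.intercalate]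
  | cons c cs ih =>
    by_cases h : PySem.Chars.isalnum c
    · have hrec : pvRstripU (pvFA cs false) =
          cs.takeWhile PySem.Chars.isalnum ++
            (if pvAlnumRuns (cs.dropWhile PySem.Chars.isalnum) = [] then []
             else '_' :: pvG (cs.dropWhile PySem.Chars.isalnum)) := by
        rw [ih.2]
        cases cs with
        | nil => simp [pvAlnumRuns]
        | cons d ds =>
          by_cases hd : PySem.Chars.isalnum d
          · rw [pvG_cons_alnum hd]
            simp [pvAlnumRuns, hd]
          · simp [pvAlnumRuns, hd]
      have hmain : pvRstripU (c :: pvFA cs false) = pvG (c :: cs) := by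
        rw [pvRstripU_cons (pvU_alnum h), hrec, pvG_cons_alnum h]
      have hne : pvAlnumRuns (c :: cs) ≠ [] := by rw [pvAlnumRuns]; simp [h]
      constructor
      · rw [pvFA]; simp only [h, if_true]; exact hmain
      · rw [pvFA]; simp only [h, if_true]; simp [hne, hmain]
    · have hrunEq : pvAlnumRuns (c :: cs) = pvAlnumRuns cs := by rw [pvAlnumRuns]; simp [h]
      have hGEq := pvG_cons_not_alnum (by simpa using h) cs
      constructor
      · rw [pvFA]; simp only [h, if_false, Bool.false_eq_true]
        simpa [hGEq] using ih.1
      · rw [pvFA]; simp only [h, if_false, Bool.false_eq_true]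
        rw [pvRstripU_cons', ih.1, hGEq, hrunEq]
        by_cases hg : pvG cs = []
        · simp [hg, (pvG_eq_nil_iff cs).mp hg, pvU]
        · simp [hg, (pvG_eq_nil_iff cs).not.mp hg]

-- stripChars by '_' of A's emission equals the joined runs
lemma pvStrip_eq (cs : List Char) :
    PySem.Chars.stripChars (pvFA cs false) ['_'] = pvG cs := by
  have hstrip : ∀ x : List Char,
      PySem.Chars.stripChars x ['_'] = pvRstripU (x.dropWhile pvU) := by
    intro x; rfl
  rw [hstrip]
  cases cs with
  | nil => simp [pvFA, pvRstripU, pvG, pvAlnumRuns, PySem.Chars.join, List.intercalate]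
  | cons c cs =>
    by_cases h : PySem.Chars.isalnum c
    · rw [pvFA]; simp only [h, if_true]
      rw [List.dropWhile_cons_of_neg (by simp [pvU_alnum h])]
      have := (pvTF (c :: cs)).2
      rw [pvFA] at this; simp only [h, if_true] at this
      rw [this]
      have hne : pvAlnumRuns (c :: cs) ≠ [] := by rw [pvAlnumRuns]; simp [h]
      simp [hne]
    · rw [pvFA]; simp only [h, if_false, Bool.false_eq_true]
      rw [List.dropWhile_cons_of_pos (by simp [pvU])]
      rw [pvG_cons_not_alnum (by simpa using h)]
      rcases pvFA_true_head cs with he | ⟨d, x, he, hd⟩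
      · rw [he]
        have := (pvTF cs).1
        rw [he] at this
        simpa [List.dropWhile] using this
      · rw [he, List.dropWhile_cons_of_neg (by simp [pvU_alnum hd]), ← he]
        exact (pvTF cs).1

-- ===== VERDICT (by name: the statement is the Claim_ definition above) =====
theorem sanitize_table_guess_py_spec : Claim_equal_sanitize_table_guess_py := by
  intro s _
  unfold Spec_sanitize_table_guess_py sanitize_table_guess_py sanitize_table_guess_py_alt
  simp only [pvFA_foldl, List.nil_append]
  rw [pvStrip_eq]
  rfl
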